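-- pv_equiv track=rewrite | github.com/pypi-data/pypi-mirror-359 | packages/autonomize-observer/autonomize_observer-0.0.9-py3-none-any.whl/autonomize_observer/monitoring/cost_tracking.py | _guess_provider
-- ===== SOURCE A (Python) =====
-- def _guess_provider(model_name: str) -> str:
--     """Guess the provider based on model name."""
--     model_lower = model_name.lower()
--     if any(
--         name in model_lower
--         for name in [
--             "gpt",
--             "openai",
--             "o1",
--             "o3",
--             "o4",
--             "davinci",
--             "babbage",
--             "whisper",
--             "tts",
--         ]
--     ):
--         return "OpenAI"
--     elif any(name in model_lower for name in ["claude", "anthropic"]):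
--         return "Anthropic"
--     elif any(name in model_lower for name in ["gemini", "google", "palm", "bard"]):
--         return "Google"
--     elif any(name in model_lower for name in ["llama", "meta"]):
--         return "Meta"
--     elif any(
--         name in model_lower
--         for name in ["mistral", "mixtral", "codestral", "pixtral"]
--     ):
--         return "Mistral"
--     elif any(name in model_lower for name in ["nova", "amazon", "bedrock"]):
--         return "Amazon"
--     elif any(name in model_lower for name in ["deepseek"]):
--         return "DeepSeek"
--     elif any(name in model_lower for name in ["command", "cohere"]):
--         return "Cohere"
--     elif any(name in model_lower for name in ["grok", "xai"]):
--         return "xAI"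
--     elif any(name in model_lower for name in ["qwen", "alibaba"]):
--         return "Alibaba"
--     elif any(name in model_lower for name in ["perplexity", "sonar"]):
--         return "Perplexity"
--     elif any(name in model_lower for name in ["nemotron", "nvidia"]):
--         return "Nvidia"
--     else:
--         return "unknown"
-- ===== SOURCE B (Python) =====
-- # Inverted index: keyword -> provider, plus an explicit priority ranking.
-- # Collect ALL matching providers, then pick the highest-priority one (min by rank).
-- _KEYWORD_PROVIDER = [
--     ("gpt", "OpenAI"), ("openai", "OpenAI"), ("o1", "OpenAI"), ("o3", "OpenAI"),
--     ("o4", "OpenAI"), ("davinci", "OpenAI"), ("babbage", "OpenAI"),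
--     ("whisper", "OpenAI"), ("tts", "OpenAI"),
--     ("claude", "Anthropic"), ("anthropic", "Anthropic"),
--     ("gemini", "Google"), ("google", "Google"), ("palm", "Google"), ("bard", "Google"),
--     ("llama", "Meta"), ("meta", "Meta"),
--     ("mistral", "Mistral"), ("mixtral", "Mistral"), ("codestral", "Mistral"),
--     ("pixtral", "Mistral"),
--     ("nova", "Amazon"), ("amazon", "Amazon"), ("bedrock", "Amazon"),
--     ("deepseek", "DeepSeek"),
--     ("command", "Cohere"), ("cohere", "Cohere"),
--     ("grok", "xAI"), ("xai", "xAI"),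
--     ("qwen", "Alibaba"), ("alibaba", "Alibaba"),
--     ("perplexity", "Perplexity"), ("sonar", "Perplexity"),
--     ("nemotron", "Nvidia"), ("nvidia", "Nvidia"),
-- ]
--
-- _PROVIDER_ORDER = [
--     "OpenAI", "Anthropic", "Google", "Meta", "Mistral", "Amazon",
--     "DeepSeek", "Cohere", "xAI", "Alibaba", "Perplexity", "Nvidia",
-- ]
--
--
-- def _guess_provider(model_name: str) -> str:
--     """Guess the provider based on model name."""
--     model_lower = model_name.lower()
--     hits = [prov for kw, prov in _KEYWORD_PROVIDER if kw in model_lower]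
--     if not hits:
--         return "unknown"
--     return min(hits, key=_PROVIDER_ORDER.index)
-- ===== Notes on version B (the rewrite author's own statement) =====
-- stated objective: alternative
-- what changed: Replaces A's short-circuiting 12-branch if/elif chain with an inverted flat keyword->provider index: B collects ALL matching providers in one filter pass and then selects the winner as the minimum under an explicit provider-priority ranking, which coincides with A's first-match precedence.
import Mathlib
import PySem

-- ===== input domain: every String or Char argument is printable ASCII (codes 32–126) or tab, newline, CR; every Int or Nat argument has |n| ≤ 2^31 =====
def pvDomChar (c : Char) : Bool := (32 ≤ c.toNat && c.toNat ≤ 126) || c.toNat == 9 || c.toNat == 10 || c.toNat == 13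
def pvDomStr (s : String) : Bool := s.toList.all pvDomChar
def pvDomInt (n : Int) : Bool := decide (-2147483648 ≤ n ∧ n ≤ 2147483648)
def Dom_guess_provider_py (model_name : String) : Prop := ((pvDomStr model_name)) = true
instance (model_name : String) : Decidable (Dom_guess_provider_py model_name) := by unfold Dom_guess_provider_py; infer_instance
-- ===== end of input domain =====

-- B replaces A's if/elif chain with an inverted keyword->provider index: collect all matching providers, return the minimum under an explicit priority ranking (alternative, same cost).


-- ===== PORT A =====
-- Port of A's if/elif chain: each branch is `any(name in model_lower for name in [...])`.
def guess_provider_py (model_name : String) : String :=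
  let model_lower := PySem.Str.lower model_name
  if ["gpt", "openai", "o1", "o3", "o4", "davinci", "babbage", "whisper", "tts"].any
      (fun name => PySem.Str.isIn name model_lower) then "OpenAI"
  else if ["claude", "anthropic"].any (fun name => PySem.Str.isIn name model_lower) then "Anthropic"
  else if ["gemini", "google", "palm", "bard"].any (fun name => PySem.Str.isIn name model_lower) then "Google"
  else if ["llama", "meta"].any (fun name => PySem.Str.isIn name model_lower) then "Meta"
  else if ["mistral", "mixtral", "codestral", "pixtral"].any (fun name => PySem.Str.isIn name model_lower) then "Mistral"
  else if ["nova", "amazon", "bedrock"].any (fun name => PySem.Str.isIn name model_lower) then "Amazon"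
  else if ["deepseek"].any (fun name => PySem.Str.isIn name model_lower) then "DeepSeek"
  else if ["command", "cohere"].any (fun name => PySem.Str.isIn name model_lower) then "Cohere"
  else if ["grok", "xai"].any (fun name => PySem.Str.isIn name model_lower) then "xAI"
  else if ["qwen", "alibaba"].any (fun name => PySem.Str.isIn name model_lower) then "Alibaba"
  else if ["perplexity", "sonar"].any (fun name => PySem.Str.isIn name model_lower) then "Perplexity"
  else if ["nemotron", "nvidia"].any (fun name => PySem.Str.isIn name model_lower) then "Nvidia"
  else "unknown"

-- ===== PORT B =====
-- B's flat keyword -> provider index (literal from Source B).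
def pvKeywordProvider : List (String × String) :=
  [("gpt", "OpenAI"), ("openai", "OpenAI"), ("o1", "OpenAI"), ("o3", "OpenAI"),
   ("o4", "OpenAI"), ("davinci", "OpenAI"), ("babbage", "OpenAI"),
   ("whisper", "OpenAI"), ("tts", "OpenAI"),
   ("claude", "Anthropic"), ("anthropic", "Anthropic"),
   ("gemini", "Google"), ("google", "Google"), ("palm", "Google"), ("bard", "Google"),
   ("llama", "Meta"), ("meta", "Meta"),
   ("mistral", "Mistral"), ("mixtral", "Mistral"), ("codestral", "Mistral"),
   ("pixtral", "Mistral"),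
   ("nova", "Amazon"), ("amazon", "Amazon"), ("bedrock", "Amazon"),
   ("deepseek", "DeepSeek"),
   ("command", "Cohere"), ("cohere", "Cohere"),
   ("grok", "xAI"), ("xai", "xAI"),
   ("qwen", "Alibaba"), ("alibaba", "Alibaba"),
   ("perplexity", "Perplexity"), ("sonar", "Perplexity"),
   ("nemotron", "Nvidia"), ("nvidia", "Nvidia")]

def pvProviderOrder : List String :=
  ["OpenAI", "Anthropic", "Google", "Meta", "Mistral", "Amazon",
   "DeepSeek", "Cohere", "xAI", "Alibaba", "Perplexity", "Nvidia"]

-- _PROVIDER_ORDER.index as priority key (all hits are members of the list).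
def pvRank (p : String) : Nat := pvProviderOrder.idxOf p

-- Port of B: hits = [prov for kw, prov in table if kw in ml]; min(hits, key=rank).
-- The foldl is Python's min with a key (first element attaining the minimal key), hand-written and exact.
def guess_provider_py_alt (model_name : String) : String :=
  let model_lower := PySem.Str.lower model_name
  let hits := (pvKeywordProvider.filter (fun kp => PySem.Str.isIn kp.1 model_lower)).map Prod.snd
  match hits with
  | [] => "unknown"
  | h :: t => t.foldl (fun best p => if pvRank p < pvRank best then p else best) h

-- ===== PRECONDITION & SPEC =====
def Spec_guess_provider_py (model_name : String) (out : String) : Prop := out = guess_provider_py_alt model_name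
instance (model_name : String) (out : String) : Decidable (Spec_guess_provider_py model_name out) := by unfold Spec_guess_provider_py; infer_instance

-- ===== CLAIM (what is proved, stated in full; the proofs are below) =====
def Claim_equal_guess_provider_py : Prop := ∀ (model_name : String), Dom_guess_provider_py model_name → Spec_guess_provider_py model_name (guess_provider_py model_name)

-- ===== LEMMAS AND PROOFS =====

-- A's branch structure as a (provider, keywords) table, for the generic proof below.
def pvTable : List (String × List String) :=
  [("OpenAI", ["gpt", "openai", "o1", "o3", "o4", "davinci", "babbage", "whisper", "tts"]),
   ("Anthropic", ["claude", "anthropic"]),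
   ("Google", ["gemini", "google", "palm", "bard"]),
   ("Meta", ["llama", "meta"]),
   ("Mistral", ["mistral", "mixtral", "codestral", "pixtral"]),
   ("Amazon", ["nova", "amazon", "bedrock"]),
   ("DeepSeek", ["deepseek"]),
   ("Cohere", ["command", "cohere"]),
   ("xAI", ["grok", "xai"]),
   ("Alibaba", ["qwen", "alibaba"]),
   ("Perplexity", ["perplexity", "sonar"]),
   ("Nvidia", ["nemotron", "nvidia"])]

-- A's chain, recursively over the table.
def pvChain (ml : String) : List (String × List String) → String
  | [] => "unknown"
  | (p, kws) :: rest =>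
      if kws.any (fun k => PySem.Str.isIn k ml) then p else pvChain ml rest

-- Flatten a table into a keyword -> provider index.
def pvFlatT (T : List (String × List String)) : List (String × String) :=
  T.flatMap (fun pk => pk.2.map (fun k => (k, pk.1)))

-- B's computation on a flattened table, with ranking r.
def pvBmin (r : String → Nat) (ml : String) (T : List (String × List String)) : String :=
  match ((pvFlatT T).filter (fun kp => PySem.Str.isIn kp.1 ml)).map Prod.snd with
  | [] => "unknown"
  | h :: t => t.foldl (fun best p => if r p < r best then p else best) h

lemma pvFoldmin_keep (r : String → Nat) :
    ∀ (t : List String) (h : String), (∀ q ∈ t, ¬ r q < r h) →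
      t.foldl (fun best p => if r p < r best then p else best) h = h := by
  intro t
  induction t with
  | nil => intro h _; rfl
  | cons q t' ih =>
      intro h hq
      have hnot : ¬ r q < r h := hq q (by simp)
      simp only [List.foldl_cons, if_neg hnot]
      exact ih h (fun x hx => hq x (by simp [hx]))

lemma pvSnd_mem_fst (T : List (String × List String)) (q : String)
    (h : q ∈ (pvFlatT T).map Prod.snd) : q ∈ T.map Prod.fst := by
  simp only [pvFlatT, List.mem_map, List.mem_flatMap] at h
  obtain ⟨kp, ⟨pk, hpk, k, hk, rfl⟩, rfl⟩ := h
  exact List.mem_map.mpr ⟨pk, hpk, rfl⟩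

lemma pvFilterMap_const (ml : String) (p : String) (kws : List String) :
    ((kws.map (fun k => (k, p))).filter (fun kp => PySem.Str.isIn kp.1 ml)).map Prod.snd
      = (kws.filter (fun k => PySem.Str.isIn k ml)).map (fun _ => p) := by
  induction kws with
  | nil => rfl
  | cons k kws' ih =>
      simp only [List.map_cons, List.filter_cons]
      split_ifs with hk
      · simp only [List.map_cons, ih]
      · exact ih

-- Generic equivalence: first-match chain = min-by-rank over all keyword hits,
-- provided the ranking is strictly increasing along the table's providers.
lemma pvChain_eq_bmin (r : String → Nat) (ml : String) :
    ∀ (T : List (String × List String)),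
      (T.map Prod.fst).Pairwise (fun a b => r a < r b) →
      pvChain ml T = pvBmin r ml T := by
  intro T
  induction T with
  | nil => intro _; rfl
  | cons pk T' ih =>
      obtain ⟨p, kws⟩ := pk
      intro hpw
      simp only [List.map_cons, List.pairwise_cons] at hpw
      obtain ⟨hlt, hpw'⟩ := hpw
      have hflat : pvFlatT ((p, kws) :: T') = kws.map (fun k => (k, p)) ++ pvFlatT T' := rfl
      have hchain : pvChain ml ((p, kws) :: T')
          = if kws.any (fun k => PySem.Str.isIn k ml) then p else pvChain ml T' := rfl
      by_cases hc : kws.any (fun k => PySem.Str.isIn k ml)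
      · -- branch matches: chain returns p; B's min also returns p
        rw [hchain, if_pos hc]
        unfold pvBmin
        rw [hflat, List.filter_append, List.map_append, pvFilterMap_const]
        obtain ⟨k, hkmem, hk⟩ := List.any_eq_true.mp hc
        cases hf : kws.filter (fun k => PySem.Str.isIn k ml) with
        | nil =>
            exfalso
            have hkin : k ∈ kws.filter (fun k => PySem.Str.isIn k ml) :=
              List.mem_filter.mpr ⟨hkmem, hk⟩
            rw [hf] at hkin; exact absurd hkin (List.not_mem_nil)
        | cons a l =>
            simp only [List.map_cons, List.cons_append]
            symm
            apply pvFoldmin_keep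
            intro q hq
            rw [List.mem_append] at hq
            rcases hq with hq | hq
            · obtain ⟨_, _, rfl⟩ := List.mem_map.mp hq; omega
            · have hq' : q ∈ (pvFlatT T').map Prod.snd := by
                obtain ⟨kp, hkp, rfl⟩ := List.mem_map.mp hq
                exact List.mem_map.mpr ⟨kp, List.mem_of_mem_filter hkp, rfl⟩
              have := hlt q (pvSnd_mem_fst T' q hq')
              omega
      · -- branch does not match: its keywords contribute nothing to the hits
        have hnil : kws.filter (fun k => PySem.Str.isIn k ml) = [] := by
          rw [List.filter_eq_nil_iff]
          intro k hk
          exact List.any_eq_false.mp (Bool.not_eq_true _ ▸ hc) k hk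
        rw [hchain, if_neg hc, ih hpw']
        unfold pvBmin
        rw [hflat, List.filter_append, List.map_append, pvFilterMap_const, hnil]
        simp only [List.map_nil, List.nil_append]

lemma pvA_eq_chain (m : String) : guess_provider_py m = pvChain (PySem.Str.lower m) pvTable := rfl

lemma pvB_eq_bmin (m : String) : guess_provider_py_alt m = pvBmin pvRank (PySem.Str.lower m) pvTable := rfl

-- ===== VERDICT (by name: the statement is the Claim_ definition above) =====
theorem guess_provider_py_spec : Claim_equal_guess_provider_py := by
  intro m _
  unfold Spec_guess_provider_py
  rw [pvA_eq_chain, pvB_eq_bmin]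
  exact pvChain_eq_bmin pvRank (PySem.Str.lower m) pvTable (by decide)
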